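-- pv_equiv track=rewrite | github.com/jtap159/file_reassembly_tool | reassemble2.py | assemble_permutations
-- ===== SOURCE A (Python) =====
-- def assemble_permutations(permutations, fragments, fixed_length, left_anchor_index):
--     # all the fragments should be greater than or equal to the fixed length at this point
--     max_overlap = fixed_length - 1
--     complete_fragment_size = len(fragments)
--     # from the permutations we use the left anchor as the starting point every time assuming we found the left anchor
--     assemblies = []
--     for permutation in permutations:
--         if len(permutation) == complete_fragment_size:
--             assembly = fragments[left_anchor_index]
--             del permutation[0]
--             for i in permutation:
--                 for j in range(max_overlap, 2, -1):
--                     if assembly[-j:] == fragments[i][:j]:  # check for match right of anchor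
--                         assembly = assembly + fragments[i][j:]
--                         break
--             assemblies.append(assembly)
--
--     return assemblies
-- ===== SOURCE B (Python) =====
-- def assemble_permutations(permutations, fragments, fixed_length, left_anchor_index):
--     # KMP-based merge: for each pair, the overlap length is the longest border of
--     # fragment_prefix + '\0' + assembly_suffix, computed by one prefix-function
--     # pass instead of trying every overlap length with string slices.
--     max_overlap = fixed_length - 1
--     complete_fragment_size = len(fragments)
--     assemblies = []
--     for permutation in permutations:
--         if len(permutation) == complete_fragment_size:
--             assembly = fragments[left_anchor_index]
--             del permutation[0]
--             if max_overlap >= 3: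
--                 for i in permutation:
--                     frag = fragments[i]
--                     s = frag[:max_overlap] + '\0' + assembly[-max_overlap:]
--                     pi = [0] * len(s)
--                     k = 0
--                     for q in range(1, len(s)):
--                         while k > 0 and s[q] != s[k]:
--                             k = pi[k - 1]
--                         if s[q] == s[k]:
--                             k += 1
--                         pi[q] = k
--                     b = pi[-1]
--                     if b >= 3:
--                         assembly = assembly + frag[b:]
--             assemblies.append(assembly)
--     return assemblies
-- ===== Notes on version B (the rewrite author's own statement) =====
-- stated objective: alternative
-- what changed: B finds each merge's overlap length with a KMP prefix-function pass over fragment_prefix + '\0' + assembly_suffix and merges when its last value is at least 3, instead of A's descending scan that tries every overlap length with a pair of string slices and breaks at the first match.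
import Mathlib
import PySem

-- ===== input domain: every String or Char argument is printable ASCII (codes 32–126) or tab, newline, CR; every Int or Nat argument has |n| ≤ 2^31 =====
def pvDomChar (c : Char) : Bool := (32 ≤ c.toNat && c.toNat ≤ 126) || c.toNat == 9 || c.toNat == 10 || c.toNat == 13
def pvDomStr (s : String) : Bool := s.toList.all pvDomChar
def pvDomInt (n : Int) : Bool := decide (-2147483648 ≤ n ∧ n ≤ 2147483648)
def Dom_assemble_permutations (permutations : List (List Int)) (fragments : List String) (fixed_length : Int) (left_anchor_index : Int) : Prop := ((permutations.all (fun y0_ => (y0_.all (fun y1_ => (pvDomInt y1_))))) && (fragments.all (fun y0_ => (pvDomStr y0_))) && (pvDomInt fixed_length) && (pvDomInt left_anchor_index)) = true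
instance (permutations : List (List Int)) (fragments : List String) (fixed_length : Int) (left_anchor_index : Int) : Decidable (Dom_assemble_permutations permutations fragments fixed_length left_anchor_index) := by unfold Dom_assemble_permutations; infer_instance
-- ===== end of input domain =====

-- B replaces A's try-every-overlap descending slice scan by a KMP prefix-function pass over
-- fragment_prefix ++ '\0' ++ assembly_suffix, reading the overlap off its last entry
-- (objective: 'alternative'). A deletes the head of each length-matching permutation in place;
-- B performs the same mutation, and the theorems below are about the return value.

-- ===== PORT A =====
-- the inner 'for j in range(max_overlap, 2, -1): if assembly[-j:] == fragments[i][:j]: …; break' loop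
def aScan (assembly : String) (fragments : List String) (i : Int) (js : List Int) : String :=
  match js with
  | [] => assembly
  | j :: rest =>
    if PySem.Str.slice assembly (some (-j)) none
         = PySem.Str.slice (PySem.List.pyGetD fragments i "") none (some j) then
      assembly ++ PySem.Str.slice (PySem.List.pyGetD fragments i "") (some j) none
    else aScan assembly fragments i rest

def assemble_permutations (permutations : List (List Int)) (fragments : List String) (fixed_length : Int) (left_anchor_index : Int) : List String :=
  let max_overlap := fixed_length - 1
  let complete_fragment_size := (fragments.length : Int)
  permutations.foldl (fun assemblies permutation =>
    if (permutation.length : Int) = complete_fragment_size then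
      let assembly := PySem.List.pyGetD fragments left_anchor_index ""
      -- 'del permutation[0]' then 'for i in permutation' iterates the tail
      let assembly := permutation.tail.foldl
        (fun assembly i => aScan assembly fragments i (PySem.List.pyRange max_overlap 2 (-1))) assembly
      assemblies ++ [assembly]
    else assemblies) []

-- ===== PORT B =====
-- the KMP fallback 'while k > 0 and s[q] != s[k]: k = pi[k - 1]' (fuel = the entry value of k,
-- which bounds the number of iterations since k strictly decreases; exact under that invariant)
def pfFB (s : List Char) (pi : List Nat) (c : Char) : Nat → Nat → Nat
  | 0, k => k
  | fuel+1, k => if 0 < k ∧ ¬(s.getD k ' ' = c) then pfFB s pi c fuel (pi.getD (k-1) 0) else k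

-- one iteration of 'for q in range(1, len(s))' over the state (pi, k)
def pfStep (s : List Char) (st : List Nat × Nat) (q : Nat) : List Nat × Nat :=
  let k1 := pfFB s st.1 (s.getD q ' ') st.2 st.2
  let k2 := if s.getD q ' ' = s.getD k1 ' ' then k1 + 1 else k1
  (st.1.set q k2, k2)

-- 'pi = [0]*len(s); k = 0; for q in range(1, len(s)): …' (range over Nat indices: exact,
-- both bounds are nonnegative)
def prefixFun (s : List Char) : List Nat :=
  ((List.range' 1 (s.length - 1)).foldl (pfStep s) (List.replicate s.length 0, 0)).1

-- one iteration of 'for i in permutation': s = frag[:m] + '\0' + assembly[-m:],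
-- b = prefix_function(s)[-1], merge if b >= 3
def bMerge (m : Int) (fragments : List String) (assembly : String) (i : Int) : String :=
  let frag := PySem.List.pyGetD fragments i ""
  let s : List Char := (PySem.Str.slice frag none (some m)).toList
      ++ Char.ofNat 0 :: (PySem.Str.slice assembly (some (-m)) none).toList
  let b := PySem.List.pyGetD (prefixFun s) (-1) 0
  if 3 ≤ b then assembly ++ PySem.Str.slice frag (some (b : Int)) none else assembly

def assemble_permutations_alt (permutations : List (List Int)) (fragments : List String) (fixed_length : Int) (left_anchor_index : Int) : List String :=
  let max_overlap := fixed_length - 1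
  let complete_fragment_size := (fragments.length : Int)
  permutations.foldl (fun assemblies permutation =>
    if (permutation.length : Int) = complete_fragment_size then
      let assembly := PySem.List.pyGetD fragments left_anchor_index ""
      let assembly := if 3 ≤ max_overlap then permutation.tail.foldl (bMerge max_overlap fragments) assembly
        else assembly
      assemblies ++ [assembly]
    else assemblies) []

-- ===== PRECONDITION & SPEC =====
-- Pre_ excludes exactly the inputs where A raises IndexError: for each permutation of matching
-- length, fragments[left_anchor_index] must exist, and — only when fixed_length ≥ 4, since otherwise
-- the inner j-range is empty and fragments[i] is never evaluated — so must fragments[i] for every i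
-- in the permutation's tail.
def Pre_assemble_permutations (permutations : List (List Int)) (fragments : List String) (fixed_length : Int) (left_anchor_index : Int) : Prop :=
  ∀ p ∈ permutations, p.length = fragments.length →
    (PySem.Raise.InRange fragments.length left_anchor_index ∧
      (4 ≤ fixed_length → ∀ i ∈ p.tail, PySem.Raise.InRange fragments.length i))
instance (permutations : List (List Int)) (fragments : List String) (fixed_length : Int) (left_anchor_index : Int) : Decidable (Pre_assemble_permutations permutations fragments fixed_length left_anchor_index) := by unfold Pre_assemble_permutations; infer_instance

def pvWitness_assemble_permutations : List (List Int) × List String × Int × Int :=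
  ([[0, 1]], ["abcde", "cdefg"], 4, 0)

def Spec_assemble_permutations (permutations : List (List Int)) (fragments : List String) (fixed_length : Int) (left_anchor_index : Int) (out : List String) : Prop := out = assemble_permutations_alt permutations fragments fixed_length left_anchor_index
instance (permutations : List (List Int)) (fragments : List String) (fixed_length : Int) (left_anchor_index : Int) (out : List String) : Decidable (Spec_assemble_permutations permutations fragments fixed_length left_anchor_index out) := by unfold Spec_assemble_permutations; infer_instance

-- ===== CLAIM (what is proved, stated in full; the proofs are below) =====
def Claim_equal_assemble_permutations : Prop := ∀ (permutations : List (List Int)) (fragments : List String) (fixed_length : Int) (left_anchor_index : Int), Dom_assemble_permutations permutations fragments fixed_length left_anchor_index → Pre_assemble_permutations permutations fragments fixed_length left_anchor_index → Spec_assemble_permutations permutations fragments fixed_length left_anchor_index (assemble_permutations permutations fragments fixed_length left_anchor_index)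

-- ===== LEMMAS AND PROOFS =====

-- k is a border of u: the prefix of length k equals the suffix of length k
def brd (u : List Char) (k : Nat) : Bool := k ≤ u.length && u.take k == u.drop (u.length - k)

-- the longest proper border
def maxB (u : List Char) : Nat := Nat.findGreatest (fun k => brd u k = true) (u.length - 1)

theorem brd_zero (u : List Char) : brd u 0 = true := by
  simp [brd]

theorem brd_iff {u : List Char} {k : Nat} :
    brd u k = true ↔ k ≤ u.length ∧ u.take k = u.drop (u.length - k) := by
  simp [brd]

-- a border of a border prefix: borders below j transfer into u.take j
theorem brd_trans_take {u : List Char} {j k : Nat} (hj : brd u j = true) (hk : k ≤ j)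
    (h : brd u k = true) : brd (u.take j) k = true := by
  rw [brd_iff] at hj h ⊢
  obtain ⟨hj1, hj2⟩ := hj
  obtain ⟨h1, h2⟩ := h
  have hl : (u.take j).length = j := by simp; omega
  refine ⟨by omega, ?_⟩
  rw [hl, List.take_take, min_eq_left hk, hj2, List.drop_drop, h2]
  congr 1
  omega

-- and back
theorem brd_of_take {u : List Char} {j k : Nat} (hj : brd u j = true)
    (h : brd (u.take j) k = true) : brd u k = true := by
  rw [brd_iff] at hj h ⊢
  obtain ⟨hj1, hj2⟩ := hj
  obtain ⟨h1, h2⟩ := h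
  have hl : (u.take j).length = j := by simp; omega
  rw [hl] at h1 h2
  refine ⟨by omega, ?_⟩
  have hstep : List.take k u = List.take k (List.take j u) := by
    rw [List.take_take, min_eq_left h1]
  rw [hstep, h2, hj2, List.drop_drop]
  congr 1
  omega

-- extending by one character
theorem brd_append {u : List Char} {c : Char} {k : Nat} (hk : k ≤ u.length) :
    brd (u ++ [c]) (k+1) = (brd u k && (u.getD k c == c)) := by
  rcases Nat.lt_or_eq_of_le hk with hlt | heq
  · apply Bool.eq_iff_iff.mpr
    simp only [Bool.and_eq_true, beq_iff_eq, brd_iff]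
    have h1 : (u ++ [c]).take (k+1) = u.take k ++ [u[k]] := by
      rw [List.take_append_of_le_length (by omega), List.take_add_one]
      rw [List.getElem?_eq_getElem hlt]
      rfl
    have h2 : (u ++ [c]).drop ((u ++ [c]).length - (k+1)) = u.drop (u.length - k) ++ [c] := by
      have : (u ++ [c]).length - (k+1) = u.length - k := by
        simp only [List.length_append, List.length_cons, List.length_nil]
        omega
      rw [this, List.drop_append_of_le_length (by omega)]
    rw [h1, h2]
    constructor
    · rintro ⟨-, he⟩
      have := List.append_inj he (by simp [hlt.le]; omega)
      refine ⟨⟨by omega, this.1⟩, ?_⟩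
      have hc := this.2
      simp at hc
      rw [List.getD_eq_getElem?_getD, List.getElem?_eq_getElem hlt]
      simpa using hc
    · rintro ⟨⟨-, he⟩, hc⟩
      rw [List.getD_eq_getElem?_getD, List.getElem?_eq_getElem hlt] at hc
      simp at hc
      refine ⟨by simp; omega, by rw [he, hc]⟩
  · subst heq
    simp [brd]

theorem maxB_brd (u : List Char) : brd u (maxB u) = true := by
  unfold maxB
  exact Nat.findGreatest_spec (P := fun k => brd u k = true) (Nat.zero_le _) (brd_zero u)

theorem maxB_le (u : List Char) : maxB u ≤ u.length - 1 := Nat.findGreatest_le _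

theorem le_maxB {u : List Char} {k : Nat} (hk : k ≤ u.length - 1) (h : brd u k = true) :
    k ≤ maxB u := Nat.le_findGreatest hk h

-- the fallback loop: from a border k of s.take q, it walks the border chain down to the
-- largest chain element whose next character matches c (or to 0)
theorem pfFB_spec (s : List Char) (pi : List Nat) (q : Nat) (hq : q ≤ s.length) (c : Char)
    (hpi : ∀ r, r < q → pi.getD r 0 = maxB (s.take (r+1))) :
    ∀ fuel k, k ≤ fuel → brd (s.take q) k = true → k < q →
      brd (s.take q) (pfFB s pi c fuel k) = true ∧ pfFB s pi c fuel k ≤ k ∧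
      (0 < pfFB s pi c fuel k → s.getD (pfFB s pi c fuel k) ' ' = c) ∧
      (∀ j, j ≤ k → brd (s.take q) j = true → s.getD j ' ' = c → j ≤ pfFB s pi c fuel k) := by
  intro fuel
  induction fuel with
  | zero =>
    intro k hk hbrd hkq
    have hk0 : k = 0 := by omega
    subst hk0
    simp only [pfFB]
    exact ⟨hbrd, le_refl 0, fun h => absurd h (lt_irrefl 0), fun j hj _ _ => hj⟩
  | succ fuel ih =>
    intro k hk hbrd hkq
    by_cases hcond : 0 < k ∧ ¬(s.getD k ' ' = c)
    · simp only [pfFB, if_pos hcond]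
      have hk1 : 1 ≤ k := hcond.1
      have hk'eq : pi.getD (k-1) 0 = maxB (s.take k) := by
        have h := hpi (k-1) (by omega)
        rwa [Nat.sub_add_cancel hk1] at h
      have hlen_take : (s.take k).length = k := by simp; omega
      have hb' : brd (s.take k) (pi.getD (k-1) 0) = true := by rw [hk'eq]; exact maxB_brd _
      have hk'le : pi.getD (k-1) 0 ≤ k - 1 := by
        rw [hk'eq]
        have := maxB_le (s.take k)
        omega
      have htk : (s.take q).take k = s.take k := by
        rw [List.take_take]
        congr 1
        omega
      have hbq' : brd (s.take q) (pi.getD (k-1) 0) = true :=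
        brd_of_take hbrd (by rw [htk]; exact hb')
      obtain ⟨r1, r2, r3, r4⟩ := ih (pi.getD (k-1) 0) (by omega) hbq' (by omega)
      refine ⟨r1, le_trans r2 (by omega), r3, ?_⟩
      intro j hj hbj hcj
      have hjk : j ≠ k := by
        intro h
        subst h
        exact hcond.2 hcj
      have hjlt : j < k := lt_of_le_of_ne hj hjk
      have hbtk : brd (s.take k) j = true := by
        have h := brd_trans_take hbrd hjlt.le hbj
        rwa [htk] at h
      have hjle : j ≤ maxB (s.take k) := le_maxB (by omega) hbtk
      exact r4 j (by omega) hbj hcj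
    · simp only [pfFB, if_neg hcond]
      exact ⟨hbrd, le_refl k, fun hr => not_not.mp (fun hne => hcond ⟨hr, hne⟩),
        fun j hj _ _ => hj⟩

-- one step of the main loop computes the next prefix-function value
theorem pfStep_correct (s : List Char) (q : Nat) (h1 : 1 ≤ q) (hq : q < s.length)
    (pi : List Nat) (k : Nat)
    (hpi : ∀ r, r < q → pi.getD r 0 = maxB (s.take (r+1))) (hk : k = maxB (s.take q)) :
    (pfStep s (pi, k) q).2 = maxB (s.take (q+1)) := by
  have htl : (s.take q).length = q := by simp; omega
  have hbk : brd (s.take q) k = true := by rw [hk]; exact maxB_brd _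
  have hkq : k < q := by
    have := maxB_le (s.take q)
    omega
  obtain ⟨r1, r2, r3, r4⟩ :=
    pfFB_spec s pi q (le_of_lt hq) (s.getD q ' ') hpi k k (le_refl k) hbk hkq
  set r := pfFB s pi (s.getD q ' ') k k with hr
  have hrq : r < q := lt_of_le_of_lt r2 hkq
  have hgd : ∀ j, j < q → (s.take q).getD j (s.getD q ' ') = s.getD j ' ' := by
    intro j hj
    have hjl : j < (s.take q).length := by omega
    have hjs : j < s.length := by omega
    simp [List.getD_eq_getElem?_getD, List.getElem?_eq_getElem hjl,
      List.getElem?_eq_getElem hjs, List.getElem_take]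
  have htsucc : s.take (q+1) = s.take q ++ [s.getD q ' '] := by
    rw [List.take_add_one, List.getElem?_eq_getElem hq]
    rw [List.getD_eq_getElem?_getD, List.getElem?_eq_getElem hq]
    rfl
  have hlsucc : (s.take (q+1)).length = q + 1 := by simp; omega
  have hmax : ∀ j, j ≤ k → brd (s.take q) j = true → s.getD j ' ' = s.getD q ' ' → j ≤ r :=
    fun j h1 h2 h3 => r4 j h1 h2 h3
  have hub : ∀ v, brd (s.take (q+1)) v = true → v ≤ q →
      (0 < v → brd (s.take q) (v-1) = true ∧ s.getD (v-1) ' ' = s.getD q ' ' ∧ v - 1 ≤ r) := by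
    intro v hv hvq hv0
    obtain ⟨j, rfl⟩ : ∃ j, v = j + 1 := ⟨v - 1, by omega⟩
    rw [htsucc, brd_append (by omega)] at hv
    simp only [Bool.and_eq_true, beq_iff_eq] at hv
    have hjc : s.getD j ' ' = s.getD q ' ' := by
      rw [← hgd j (by omega)]
      exact hv.2
    have hjk : j ≤ k := by
      rw [hk]
      exact le_maxB (by omega) hv.1
    exact ⟨by simpa using hv.1, by simpa using hjc, by simpa using hmax j hjk hv.1 hjc⟩
  simp only [pfStep, ← hr]
  by_cases hc : s.getD q ' ' = s.getD r ' '
  · rw [if_pos hc]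
    apply le_antisymm
    · apply le_maxB (by omega)
      rw [htsucc, brd_append (by omega)]
      simp only [Bool.and_eq_true, beq_iff_eq]
      exact ⟨r1, by rw [hgd r hrq]; exact hc.symm⟩
    · have hv := maxB_brd (s.take (q+1))
      have hvq : maxB (s.take (q+1)) ≤ q := by
        have := maxB_le (s.take (q+1))
        omega
      rcases Nat.eq_zero_or_pos (maxB (s.take (q+1))) with h0 | hpos
      · omega
      · obtain ⟨-, -, h3⟩ := hub _ hv hvq hpos
        omega
  · have hr0 : r = 0 := by
      by_contra hne
      exact hc (r3 (by omega)).symm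
    rw [if_neg hc, hr0]
    symm
    unfold maxB
    rw [Nat.findGreatest_eq_zero_iff]
    intro v hv0 hvb hbv
    have := hub v hbv (by omega) hv0
    obtain ⟨hb1, hb2, hb3⟩ := this
    have : v - 1 = 0 := by omega
    rw [hr0] at hb3
    have hv1 : v = 1 := by omega
    subst hv1
    simp only [Nat.sub_self] at hb2
    rw [hr0] at hc
    exact hc hb2.symm

-- the loop invariant
theorem pfLoop_inv (s : List Char) (hn : 1 ≤ s.length) :
    ∀ jn, jn ≤ s.length - 1 →
      (((List.range' 1 jn).foldl (pfStep s) (List.replicate s.length 0, 0)).1.length = s.length) ∧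
      (((List.range' 1 jn).foldl (pfStep s) (List.replicate s.length 0, 0)).2 = maxB (s.take (jn+1))) ∧
      (∀ r, r ≤ jn → ((List.range' 1 jn).foldl (pfStep s) (List.replicate s.length 0, 0)).1.getD r 0
          = maxB (s.take (r+1))) := by
  intro jn
  induction jn with
  | zero =>
    intro _
    simp only [List.range'_zero, List.foldl_nil]
    have h1 : maxB (s.take 1) = 0 := by
      unfold maxB
      have hl : (s.take 1).length = 1 := by simp; omega
      rw [hl]
      simp
    refine ⟨by simp, by simpa using h1.symm, ?_⟩
    intro r hr
    have hr0 : r = 0 := by omega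
    subst hr0
    rcases Nat.eq_zero_or_pos s.length with h0 | hpos
    · omega
    · rw [List.getD_eq_getElem?_getD, List.getElem?_eq_getElem (by simpa using hpos)]
      simpa using h1.symm
  | succ jn ih =>
    intro hle
    obtain ⟨L, K, R⟩ := ih (by omega)
    have hrange : List.range' 1 (jn+1) = List.range' 1 jn ++ [1 + jn] := by
      simpa using List.range'_concat (step := 1) (s := 1) (n := jn)
    rw [hrange, List.foldl_append, List.foldl_cons, List.foldl_nil]
    set st := (List.range' 1 jn).foldl (pfStep s) (List.replicate s.length 0, 0) with hst
    have hq : 1 + jn < s.length := by omega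
    have hcor : (pfStep s st (1+jn)).2 = maxB (s.take ((1+jn)+1)) := by
      have h := pfStep_correct s (1+jn) (by omega) hq st.1 st.2
        (fun r hr => R r (by omega))
        (by rw [K]; congr 2; omega)
      simpa using h
    have hfst : (pfStep s st (1+jn)).1 = st.1.set (1+jn) ((pfStep s st (1+jn)).2) := rfl
    refine ⟨?_, ?_, ?_⟩
    · rw [hfst, List.length_set]
      exact L
    · rw [hcor]
      congr 2
      omega
    · intro r hr
      rcases Nat.lt_or_ge r (1+jn) with hlt | hge
      · rw [hfst, List.getD_eq_getElem?_getD, List.getElem?_set_ne (by omega),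
          ← List.getD_eq_getElem?_getD]
        exact R r (by omega)
      · have hreq : r = 1 + jn := by omega
        subst hreq
        rw [hfst, List.getD_eq_getElem?_getD, List.getElem?_set_self (by rw [L]; omega)]
        simpa using hcor

theorem prefixFun_length (s : List Char) : (prefixFun s).length = s.length := by
  rcases Nat.eq_zero_or_pos s.length with h0 | h1
  · unfold prefixFun
    rw [h0]
    simp
  · exact (pfLoop_inv s h1 (s.length - 1) (le_refl _)).1

theorem prefixFun_last (s : List Char) (hn : 1 ≤ s.length) :
    (prefixFun s).getD (s.length - 1) 0 = maxB s := by
  have R := (pfLoop_inv s hn (s.length - 1) (le_refl _)).2.2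
  unfold prefixFun
  rw [R (s.length - 1) (le_refl _)]
  have heq : s.length - 1 + 1 = s.length := by omega
  rw [heq, List.take_length]

-- borders of p ++ '\0' ++ w, with '\0' in neither part, are exactly the suffix-prefix overlaps
theorem brd_sep {p w : List Char} (hp : Char.ofNat 0 ∉ p) (hw : Char.ofNat 0 ∉ w) {k : Nat}
    (hk : k < (p ++ Char.ofNat 0 :: w).length) :
    brd (p ++ Char.ofNat 0 :: w) k = true ↔
      k ≤ p.length ∧ k ≤ w.length ∧ w.drop (w.length - k) = p.take k := by
  have hlen : (p ++ Char.ofNat 0 :: w).length = p.length + 1 + w.length := by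
    simp only [List.length_append, List.length_cons]
    omega
  rw [hlen] at hk
  have hmemD : ∀ (l : List Char) (j : Nat), j < l.length → l.getD j ' ' ∈ l := by
    intro l j h
    rw [List.getD_eq_getElem?_getD, List.getElem?_eq_getElem h]
    exact List.getElem_mem h
  have hgdtake : ∀ (l : List Char) (kk j : Nat), j < kk → j < l.length →
      (l.take kk).getD j ' ' = l.getD j ' ' := by
    intro l kk j h1 h2
    have hj : j < (l.take kk).length := by simp; omega
    rw [List.getD_eq_getElem?_getD, List.getElem?_eq_getElem hj,
      List.getD_eq_getElem?_getD, List.getElem?_eq_getElem h2]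
    simp [List.getElem_take]
  have hgddrop : ∀ (l : List Char) (t j : Nat), t + j < l.length →
      (l.drop t).getD j ' ' = l.getD (t + j) ' ' := by
    intro l t j h
    have hj : j < (l.drop t).length := by simp; omega
    rw [List.getD_eq_getElem?_getD, List.getElem?_eq_getElem hj,
      List.getD_eq_getElem?_getD, List.getElem?_eq_getElem h]
    simp [List.getElem_drop]
  have hsep0 : (p ++ Char.ofNat 0 :: w).getD p.length ' ' = Char.ofNat 0 := by
    rw [List.getD_append_right _ _ _ _ (le_refl _), Nat.sub_self, List.getD_cons_zero]
  have huniq : ∀ j, j < p.length + 1 + w.length →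
      (p ++ Char.ofNat 0 :: w).getD j ' ' = Char.ofNat 0 → j = p.length := by
    intro j hj hv
    rcases lt_trichotomy j p.length with h | h | h
    · rw [List.getD_append _ _ _ _ h] at hv
      exact absurd (hv ▸ hmemD p j h) hp
    · exact h
    · exfalso
      rw [List.getD_append_right _ _ _ _ (by omega)] at hv
      have ht : j - p.length = (j - p.length - 1) + 1 := by omega
      rw [ht, List.getD_cons_succ] at hv
      exact hw (hv ▸ hmemD w (j - p.length - 1) (by omega))
  constructor
  · intro h
    rw [brd_iff, hlen] at h
    obtain ⟨h1, h2⟩ := h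
    have claim1 : k ≤ p.length := by
      by_contra hgt
      have e := congrArg (fun l => l.getD p.length ' ') h2
      simp only at e
      rw [hgdtake _ _ _ (by omega) (by omega), hgddrop _ _ _ (by omega)] at e
      rw [hsep0] at e
      have := huniq _ (by omega) e.symm
      omega
    have claim2 : k ≤ w.length := by
      by_contra hgt
      have e := congrArg (fun l => l.getD (p.length - (p.length + 1 + w.length - k)) ' ') h2
      simp only at e
      rw [hgdtake _ _ _ (by omega) (by omega), hgddrop _ _ _ (by omega)] at e
      have hidx : p.length + 1 + w.length - k + (p.length - (p.length + 1 + w.length - k))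
          = p.length := by omega
      rw [hidx, hsep0] at e
      have := huniq _ (by omega) e
      omega
    refine ⟨claim1, claim2, ?_⟩
    have htake : (p ++ Char.ofNat 0 :: w).take k = p.take k :=
      List.take_append_of_le_length claim1
    have hdrop : (p ++ Char.ofNat 0 :: w).drop (p.length + 1 + w.length - k)
        = w.drop (w.length - k) := by
      rw [List.drop_append, List.drop_eq_nil_of_le (by omega)]
      have ht : p.length + 1 + w.length - k - p.length = (w.length - k) + 1 := by omega
      rw [ht, List.drop_succ_cons]
      simp
    rw [htake, hdrop] at h2
    exact h2.symm
  · rintro ⟨h1, h2, h3⟩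
    rw [brd_iff, hlen]
    refine ⟨by omega, ?_⟩
    have htake : (p ++ Char.ofNat 0 :: w).take k = p.take k :=
      List.take_append_of_le_length h1
    have hdrop : (p ++ Char.ofNat 0 :: w).drop (p.length + 1 + w.length - k)
        = w.drop (w.length - k) := by
      rw [List.drop_append, List.drop_eq_nil_of_le (by omega)]
      have ht : p.length + 1 + w.length - k - p.length = (w.length - k) + 1 := by omega
      rw [ht, List.drop_succ_cons]
      simp
    rw [htake, hdrop, h3]

-- descending find? picks the greatest matching element
theorem find?_desc_max {l : List Int} {P : Int → Bool} (hl : l.Pairwise (· > ·)) {j : Int}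
    (h : l.find? P = some j) : ∀ x ∈ l, P x = true → x ≤ j := by
  induction l with
  | nil => simp at h
  | cons a t ih =>
    rcases List.pairwise_cons.mp hl with ⟨ha, ht⟩
    intro x hx hPx
    cases hPa : P a with
    | true =>
      rw [List.find?_cons_of_pos hPa] at h
      have hja : j = a := by simpa using h.symm
      subst hja
      rcases List.mem_cons.mp hx with rfl | hxt
      · exact le_refl x
      · exact le_of_lt (ha x hxt)
    | false =>
      rw [List.find?_cons_of_neg (by simp [hPa])] at h
      rcases List.mem_cons.mp hx with rfl | hxt
      · exact absurd hPx (by simp [hPa])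
      · exact ih ht h x hxt hPx

-- A's break-loop is "first match of the list"
theorem aScan_eq_find (assembly : String) (fragments : List String) (i : Int) (js : List Int) :
    aScan assembly fragments i js =
      match js.find? (fun j => decide (PySem.Str.slice assembly (some (-j)) none
          = PySem.Str.slice (PySem.List.pyGetD fragments i "") none (some j))) with
      | some j => assembly ++ PySem.Str.slice (PySem.List.pyGetD fragments i "") (some j) none
      | none => assembly := by
  induction js with
  | nil => rfl
  | cons j rest ih =>
    simp only [aScan, List.find?]
    by_cases h : PySem.Str.slice assembly (some (-j)) none
        = PySem.Str.slice (PySem.List.pyGetD fragments i "") none (some j)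
    · simp [h]
    · simp [h, ih]

-- the per-fragment step: A's descending slice scan equals B's KMP merge
set_option maxHeartbeats 2000000 in
theorem merge_eq (m : Int) (hm : 3 ≤ m) (fragments : List String) (i : Int) (assembly : String)
    (hA : ∀ c ∈ assembly.toList, pvDomChar c = true)
    (hF : ∀ c ∈ (PySem.List.pyGetD fragments i "").toList, pvDomChar c = true) :
    aScan assembly fragments i (PySem.List.pyRange m 2 (-1)) = bMerge m fragments assembly i := by
  rw [aScan_eq_find]
  have hm3 : (3:Nat) ≤ m.toNat := by omega
  have hmm : ((m.toNat : Nat) : Int) = m := by omega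
  have hbm0 : bMerge m fragments assembly i =
      (if 3 ≤ PySem.List.pyGetD (prefixFun ((PySem.Str.slice (PySem.List.pyGetD fragments i "") none (some m)).toList
            ++ Char.ofNat 0 :: (PySem.Str.slice assembly (some (-m)) none).toList)) (-1) 0 then
        assembly ++ PySem.Str.slice (PySem.List.pyGetD fragments i "")
          (some ((PySem.List.pyGetD (prefixFun ((PySem.Str.slice (PySem.List.pyGetD fragments i "") none (some m)).toList
            ++ Char.ofNat 0 :: (PySem.Str.slice assembly (some (-m)) none).toList)) (-1) 0 : Nat) : Int)) none
      else assembly) := rfl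
  rw [hbm0]
  obtain ⟨F, hF_def⟩ : ∃ F, PySem.List.pyGetD fragments i "" = F := ⟨_, rfl⟩
  rw [hF_def] at hF ⊢
  have hslice_p : (PySem.Str.slice F none (some m)).toList = F.toList.take m.toNat := by
    rw [PySem.Str.toList_slice]
    simp only [PySem.Chars.slice_eq_listSlice]
    rw [← hmm, PySem.List.slice_to_natCast, Int.toNat_natCast]
  have hslice_w : (PySem.Str.slice assembly (some (-m)) none).toList
      = assembly.toList.drop (assembly.toList.length - m.toNat) := by
    rw [PySem.Str.toList_slice]
    simp only [PySem.Chars.slice_eq_listSlice]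
    rw [← hmm, PySem.List.slice_from_neg_natCast _ _ (by omega), Int.toNat_natCast]
  rw [hslice_p, hslice_w]
  obtain ⟨p, hp_def⟩ : ∃ p, F.toList.take m.toNat = p := ⟨_, rfl⟩
  obtain ⟨w, hw_def⟩ : ∃ w, assembly.toList.drop (assembly.toList.length - m.toNat) = w := ⟨_, rfl⟩
  rw [hp_def, hw_def]
  obtain ⟨s, hs_def⟩ : ∃ s, p ++ Char.ofNat 0 :: w = s := ⟨_, rfl⟩
  rw [hs_def]
  have hsep_p : Char.ofNat 0 ∉ p := by
    rw [← hp_def]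
    intro hmem
    exact absurd (hF _ (List.mem_of_mem_take hmem)) (by decide)
  have hsep_w : Char.ofNat 0 ∉ w := by
    rw [← hw_def]
    intro hmem
    exact absurd (hA _ (List.mem_of_mem_drop hmem)) (by decide)
  have hslen : s.length = p.length + 1 + w.length := by
    rw [← hs_def]
    simp only [List.length_append, List.length_cons]
    omega
  have hspos : 1 ≤ s.length := by omega
  have hlp : p.length = min m.toNat F.toList.length := by
    rw [← hp_def, List.length_take]
  have hlw : w.length = min m.toNat assembly.toList.length := by
    rw [← hw_def, List.length_drop]
    omega
  have hbv : PySem.List.pyGetD (prefixFun s) (-1) 0 = maxB s := by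
    have hlen : (prefixFun s).length = s.length := prefixFun_length s
    have h2 := prefixFun_last s hspos
    rw [List.getD_eq_getElem?_getD, List.getElem?_eq_getElem (by omega)] at h2
    rw [show (-1 : Int) = -((1:Nat):Int) from by simp,
      PySem.List.pyGetD_neg_natCast _ _ _ (by omega) (by omega)]
    simp only [hlen]
    exact h2
  rw [hbv]
  have hbrd_sep : ∀ {k : Nat}, k < s.length →
      (brd s k = true ↔ k ≤ p.length ∧ k ≤ w.length ∧ w.drop (w.length - k) = p.take k) := by
    intro k hk
    rw [← hs_def] at hk ⊢
    exact brd_sep hsep_p hsep_w hk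
  have hchar : ∀ k : Nat, 1 ≤ k → k ≤ m.toNat → k < s.length →
      (brd s k = true ↔ (k ≤ assembly.toList.length ∧ k ≤ F.toList.length ∧
        assembly.toList.drop (assembly.toList.length - k) = F.toList.take k)) := by
    intro k h1 h2 hks
    have hov_eq : w.drop (w.length - k) = assembly.toList.drop (assembly.toList.length - k) := by
      rw [← hw_def, List.drop_drop]
      congr 1
      simp only [List.length_drop]
      omega
    have hptake : p.take k = F.toList.take k := by
      rw [← hp_def, List.take_take, min_eq_left (by omega)]
    rw [hbrd_sep hks]
    constructor
    · rintro ⟨hkp, hkw, hov⟩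
      refine ⟨by omega, by omega, ?_⟩
      rw [hov_eq, hptake] at hov
      exact hov
    · rintro ⟨hka, hkf, hov⟩
      refine ⟨by omega, by omega, ?_⟩
      rw [hov_eq, hptake]
      exact hov
  have hPiff : ∀ j : Int, 2 < j → j ≤ m →
      ((PySem.Str.slice assembly (some (-j)) none = PySem.Str.slice F none (some j)) ↔
       (assembly.toList.drop (assembly.toList.length - j.toNat) = F.toList.take j.toNat)) := by
    intro j h1 h2
    have hj : ((j.toNat : Nat) : Int) = j := by omega
    constructor
    · intro he
      have h := congrArg String.toList he
      rw [PySem.Str.toList_slice, PySem.Str.toList_slice] at h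
      simp only [PySem.Chars.slice_eq_listSlice] at h
      rwa [← hj, PySem.List.slice_from_neg_natCast _ _ (by omega),
        PySem.List.slice_to_natCast] at h
    · intro he
      apply String.toList_inj.mp
      rw [PySem.Str.toList_slice, PySem.Str.toList_slice]
      simp only [PySem.Chars.slice_eq_listSlice]
      rw [← hj, PySem.List.slice_from_neg_natCast _ _ (by omega),
        PySem.List.slice_to_natCast]
      exact he
  cases hfind : (PySem.List.pyRange m 2 (-1)).find? (fun j =>
      decide (PySem.Str.slice assembly (some (-j)) none = PySem.Str.slice F none (some j))) with
  | none =>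
    have hno := List.find?_eq_none.mp hfind
    have h3 : ¬ (3 ≤ maxB s) := by
      intro h3
      have hb := maxB_brd s
      have hblt : maxB s < s.length := by
        have := maxB_le s
        omega
      have hbmle : maxB s ≤ m.toNat := by
        obtain ⟨h1, -, -⟩ := (hbrd_sep hblt).mp hb
        omega
      obtain ⟨hla, hlf, hov⟩ := (hchar (maxB s) (by omega) hbmle hblt).mp hb
      have hmem : ((maxB s : Nat) : Int) ∈ PySem.List.pyRange m 2 (-1) :=
        PySem.List.mem_pyRange_neg_one.mpr ⟨by omega, by omega⟩
      apply hno _ hmem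
      simp only [decide_eq_true_eq]
      apply (hPiff _ (by omega) (by omega)).mpr
      rwa [Int.toNat_natCast]
    rw [if_neg h3]
  | some j =>
    have hjmem := List.mem_of_find?_eq_some hfind
    have hjr := PySem.List.mem_pyRange_neg_one.mp hjmem
    have hPj := List.find?_some hfind
    rw [decide_eq_true_eq] at hPj
    have hCj := (hPiff j hjr.1 hjr.2).mp hPj
    have hpair : (PySem.List.pyRange m 2 (-1)).Pairwise (· > ·) := by
      rw [PySem.List.pyRange_neg_one_eq_reverse, List.pairwise_reverse]
      exact PySem.List.pairwise_lt_pyRange_one _ _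
    have hmaxA := find?_desc_max hpair hfind
    by_cases hsmall : j.toNat ≤ assembly.toList.length ∧ j.toNat ≤ F.toList.length
    · have hjs : j.toNat < s.length := by omega
      have hbj : brd s j.toNat = true :=
        (hchar j.toNat (by omega) (by omega) hjs).mpr ⟨hsmall.1, hsmall.2, hCj⟩
      have h1 : j.toNat ≤ maxB s := le_maxB (by omega) hbj
      have h2 : maxB s ≤ j.toNat := by
        have hb := maxB_brd s
        have hblt : maxB s < s.length := by
          have := maxB_le s
          omega
        have hbmle : maxB s ≤ m.toNat := by
          obtain ⟨hx, -, -⟩ := (hbrd_sep hblt).mp hb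
          omega
        obtain ⟨hla, hlf, hov⟩ := (hchar (maxB s) (by omega) hbmle hblt).mp hb
        have hmem : ((maxB s : Nat) : Int) ∈ PySem.List.pyRange m 2 (-1) :=
          PySem.List.mem_pyRange_neg_one.mpr ⟨by omega, by omega⟩
        have hle := hmaxA _ hmem (by
          simp only [decide_eq_true_eq]
          apply (hPiff _ (by omega) (by omega)).mpr
          rwa [Int.toNat_natCast])
        omega
      have hEq : ((maxB s : Nat) : Int) = j := by omega
      rw [if_pos (by omega), hEq]
    · have hlen_raw : assembly.toList.length - (assembly.toList.length - j.toNat)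
          = min j.toNat F.toList.length := by
        have h := congrArg List.length hCj
        simpa using h
      rcases not_and_or.mp hsmall with hbig | hbig
      all_goals have hdeg : assembly.toList.length < j.toNat ∧ F.toList.length < j.toNat := by omega
      all_goals {
        have haf : assembly.toList = F.toList := by
          have h0 : assembly.toList.length - j.toNat = 0 := by omega
          rw [h0, List.drop_zero, List.take_of_length_le (by omega)] at hCj
          exact hCj
        have hlafe : assembly.toList.length = F.toList.length := by rw [haf]
        have hjm' : j.toNat ≤ m.toNat := by omega
        have hw_eq : w = assembly.toList := by
          rw [← hw_def, show assembly.toList.length - m.toNat = 0 from by omega, List.drop_zero]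
        have hp_eq : p = F.toList := by
          rw [← hp_def]
          exact List.take_of_length_le (by omega)
        have hwl : w.length = assembly.toList.length := by rw [hw_eq]
        have hpl : p.length = F.toList.length := by rw [hp_eq]
        have hlaS : assembly.toList.length < s.length := by omega
        have hbla : brd s assembly.toList.length = true := by
          apply (hbrd_sep hlaS).mpr
          refine ⟨by omega, by omega, ?_⟩
          rw [hw_eq, hp_eq]
          rw [show assembly.toList.length - assembly.toList.length = 0 from by omega]
          rw [List.drop_zero, hlafe, List.take_length]
          exact haf
        have hble : assembly.toList.length ≤ maxB s := le_maxB (by omega) hbla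
        have hAslice : (PySem.Str.slice F (some j) none).toList = [] := by
          rw [PySem.Str.toList_slice]
          simp only [PySem.Chars.slice_eq_listSlice]
          rw [show j = ((j.toNat : Nat) : Int) from by omega, PySem.List.slice_from_natCast]
          exact List.drop_eq_nil_of_le (by omega)
        by_cases h3 : 3 ≤ maxB s
        · rw [if_pos h3]
          have hblt : maxB s < s.length := by
            have := maxB_le s
            omega
          obtain ⟨hbs, -, -⟩ := (hbrd_sep hblt).mp (maxB_brd s)
          have hBslice : (PySem.Str.slice F (some ((maxB s : Nat) : Int)) none).toList = [] := by
            rw [PySem.Str.toList_slice]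
            simp only [PySem.Chars.slice_eq_listSlice]
            rw [PySem.List.slice_from_natCast]
            exact List.drop_eq_nil_of_le (by omega)
          apply String.toList_inj.mp
          rw [String.toList_append, String.toList_append, hAslice, hBslice]
        · rw [if_neg h3]
          apply String.toList_inj.mp
          rw [String.toList_append, hAslice, List.append_nil]
      }

-- characters of fragments[i] (with default "") are domain characters
theorem pyGetD_chars (fragments : List String)
    (hfr : ∀ g ∈ fragments, ∀ c ∈ g.toList, pvDomChar c = true) (idx : Int) :
    ∀ c ∈ (PySem.List.pyGetD fragments idx "").toList, pvDomChar c = true := by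
  by_cases h : PySem.Raise.InRange fragments.length idx
  · exact hfr _ (PySem.List.pyGetD_mem fragments "" h)
  · rw [PySem.List.pyGetD_of_none fragments idx "" ((PySem.List.pyGet?_eq_none_iff fragments idx).mpr h)]
    intro c hc
    simp at hc

-- aScan only appends fragment characters
theorem aScan_chars (fragments : List String) (i : Int) :
    ∀ (js : List Int) (acc : String), (∀ c ∈ acc.toList, pvDomChar c = true) →
    (∀ c ∈ (PySem.List.pyGetD fragments i "").toList, pvDomChar c = true) →
    ∀ c ∈ (aScan acc fragments i js).toList, pvDomChar c = true := by
  intro js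
  induction js with
  | nil =>
    intro acc ha _ c hc
    exact ha c hc
  | cons j rest ih =>
    intro acc ha hf c hc
    simp only [aScan] at hc
    by_cases hcond : PySem.Str.slice acc (some (-j)) none
        = PySem.Str.slice (PySem.List.pyGetD fragments i "") none (some j)
    · rw [if_pos hcond, String.toList_append] at hc
      rcases List.mem_append.mp hc with h1 | h2
      · exact ha c h1
      · rw [PySem.Str.toList_slice] at h2
        simp only [PySem.Chars.slice_eq_listSlice] at h2
        exact hf _ (PySem.List.mem_of_mem_slice _ _ _ h2)
    · rw [if_neg hcond] at hc
      exact ih acc ha hf c hc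

-- with an empty j-range, A's inner loop is the identity
theorem foldl_aScan_nil (fragments : List String) : ∀ (tail : List Int) (acc : String),
    tail.foldl (fun a i => aScan a fragments i []) acc = acc := by
  intro tail
  induction tail with
  | nil => intro acc; rfl
  | cons i rest ih => intro acc; rw [List.foldl_cons]; exact ih acc

-- the per-permutation loop: A's scan fold equals B's KMP-merge fold
theorem foldl_scan_eq_merge (fragments : List String) (m : Int) (h3 : 3 ≤ m)
    (hfr : ∀ g ∈ fragments, ∀ c ∈ g.toList, pvDomChar c = true) :
    ∀ (tail : List Int) (acc : String), (∀ c ∈ acc.toList, pvDomChar c = true) →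
    tail.foldl (fun a i => aScan a fragments i (PySem.List.pyRange m 2 (-1))) acc
      = tail.foldl (bMerge m fragments) acc := by
  intro tail
  induction tail with
  | nil =>
    intro acc _
    simp only [List.foldl_nil]
  | cons i rest ih =>
    intro acc hacc
    simp only [List.foldl_cons]
    rw [← merge_eq m h3 fragments i acc hacc (pyGetD_chars fragments hfr i)]
    exact ih _ (aScan_chars fragments i _ acc hacc (pyGetD_chars fragments hfr i))

-- ===== VERDICT (by name: the statement is the Claim_ definition above) =====
set_option maxHeartbeats 2000000 in
theorem assemble_permutations_spec : Claim_equal_assemble_permutations := by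
  intro permutations fragments fixed_length left_anchor_index hD hP
  have hfr : ∀ g ∈ fragments, ∀ c ∈ g.toList, pvDomChar c = true := by
    unfold Dom_assemble_permutations at hD
    simp only [Bool.and_eq_true, List.all_eq_true] at hD
    intro g hg c hc
    have h := hD.1.1.2 g hg
    unfold pvDomStr at h
    rw [List.all_eq_true] at h
    exact h c hc
  clear hD hP
  unfold Spec_assemble_permutations
  simp only [assemble_permutations, assemble_permutations_alt]
  congr 1
  funext assemblies perm
  by_cases hlen : (perm.length : Int) = (fragments.length : Int)
  · simp only [if_pos hlen]
    by_cases h3 : 3 ≤ fixed_length - 1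
    · rw [if_pos h3,
        foldl_scan_eq_merge fragments _ h3 hfr _ _ (pyGetD_chars fragments hfr left_anchor_index)]
    · rw [if_neg h3]
      simp only [PySem.List.pyRange_neg_one_eq_nil (show fixed_length - 1 ≤ 2 from by omega)]
      rw [foldl_aScan_nil]
  · simp only [if_neg hlen]
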